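-- pv_equiv track=rewrite | github.com/SvenHauns/INSIGHT_RNA | DMS/scripts/get_candidates.py | create_gene_sublist
-- ===== SOURCE A (Python) =====
-- def create_gene_sublist(starts, ends, exon_number):
--
--
--     full_gene_exons_start = []
--     full_gene_exons_end = []
--
--     for enum, start in enumerate(starts):
--         exons = exon_number[enum]
--
--         exon_list_start_full = []
--         exon_list_end_full = []
--
--         exon_list_start = []
--         exon_list_end = []
--
--         last_ex = 1
--
--         for ex_num, ex in enumerate(exons):
--             if ex > last_ex:
--                 exon_list_start.append(starts[enum][ex_num])
--                 exon_list_end.append(ends[enum][ex_num])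
--
--
--                 last_ex = ex
--
--             else:
--                 if exon_list_start != []: exon_list_start_full.append(exon_list_start)
--                 if exon_list_end != []: exon_list_end_full.append(exon_list_end)
--
--                 exon_list_start = []
--                 exon_list_end = []
--
--                 exon_list_start.append(starts[enum][ex_num])
--                 exon_list_end.append(ends[enum][ex_num])
--
--                 last_ex = ex
--
--
--         if exon_list_start != []:
--             exon_list_start_full.append(exon_list_start)
--             exon_list_end_full.append(exon_list_end)
--
--         full_gene_exons_start.append(exon_list_start_full)
--         full_gene_exons_end.append(exon_list_end_full)
--
--
--
--     return full_gene_exons_start, full_gene_exons_end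
-- ===== SOURCE B (Python) =====
-- def create_gene_sublist(starts, ends, exon_number):
--     full_gene_exons_start = []
--     full_gene_exons_end = []
--     for g in range(len(starts)):
--         exons = exon_number[g]
--         n = len(exons)
--         gene_start = []
--         gene_end = []
--         i = 0
--         while i < n:
--             j = i + 1
--             while j < n and exons[j] > exons[j - 1]:
--                 j += 1
--             gene_start.append([starts[g][k] for k in range(i, j)])
--             gene_end.append([ends[g][k] for k in range(i, j)])
--             i = j
--         full_gene_exons_start.append(gene_start)
--         full_gene_exons_end.append(gene_end)
--     return full_gene_exons_start, full_gene_exons_end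
-- ===== Notes on version B (the rewrite author's own statement) =====
-- stated objective: alternative
-- what changed: A's flush-accumulator single fold (current-run buffers, last_ex sentinel starting at 1, conditional flushes plus a final flush) is replaced by a two-pointer scan per gene: an inner pointer extends each strictly-increasing run of exon numbers to its end, and the run's start/end coordinates are collected in one comprehension per run, with no run buffers or flush logic.
import Mathlib
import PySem

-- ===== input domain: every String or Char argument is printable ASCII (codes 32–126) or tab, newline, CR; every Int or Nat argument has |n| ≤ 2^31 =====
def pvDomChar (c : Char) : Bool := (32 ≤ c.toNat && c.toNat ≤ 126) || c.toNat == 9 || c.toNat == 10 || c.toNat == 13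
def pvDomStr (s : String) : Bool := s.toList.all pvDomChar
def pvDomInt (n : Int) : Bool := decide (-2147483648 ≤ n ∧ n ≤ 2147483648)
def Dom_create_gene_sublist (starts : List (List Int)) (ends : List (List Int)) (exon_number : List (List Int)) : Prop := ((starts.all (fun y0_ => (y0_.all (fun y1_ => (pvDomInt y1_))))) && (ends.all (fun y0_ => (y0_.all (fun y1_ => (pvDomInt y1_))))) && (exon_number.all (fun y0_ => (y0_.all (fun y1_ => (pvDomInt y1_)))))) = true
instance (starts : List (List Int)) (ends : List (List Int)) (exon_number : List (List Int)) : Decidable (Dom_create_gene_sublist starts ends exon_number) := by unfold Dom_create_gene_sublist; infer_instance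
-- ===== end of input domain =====

-- B replaces A's flush-accumulator fold by a per-gene two-pointer scan over maximal strictly
-- increasing runs of exon numbers (objective: alternative, same cost; return values only, no mutation).

-- ===== PORT A =====
-- state of A's inner loop: (exon_list_start_full, exon_list_end_full, exon_list_start, exon_list_end, last_ex)
def aStep (S E : List Int)
    (st : List (List Int) × List (List Int) × List Int × List Int × Int)
    (p : Int × Int) :
    List (List Int) × List (List Int) × List Int × List Int × Int :=
  let fs := st.1; let fe := st.2.1; let rs := st.2.2.1; let re := st.2.2.2.1; let last := st.2.2.2.2
  if p.2 > last then
    (fs, fe, rs ++ [PySem.List.pyGetD S p.1 0], re ++ [PySem.List.pyGetD E p.1 0], p.2)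
  else
    ((if rs ≠ [] then fs ++ [rs] else fs), (if re ≠ [] then fe ++ [re] else fe),
     [PySem.List.pyGetD S p.1 0], [PySem.List.pyGetD E p.1 0], p.2)

-- A's trailing 'if exon_list_start != []' flush
def aFinish (st : List (List Int) × List (List Int) × List Int × List Int × Int) :
    List (List Int) × List (List Int) :=
  if st.2.2.1 ≠ [] then (st.1 ++ [st.2.2.1], st.2.1 ++ [st.2.2.2.1]) else (st.1, st.2.1)

-- A's inner 'for ex_num, ex in enumerate(exons)' loop for one gene
def aInner (S E xs : List Int) : List (List Int) × List (List Int) :=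
  aFinish ((PySem.List.enumerate xs 0).foldl (aStep S E) ([], [], [], [], (1 : Int)))

def create_gene_sublist (starts : List (List Int)) (ends : List (List Int)) (exon_number : List (List Int)) : List (List (List Int)) × List (List (List Int)) :=
  (PySem.List.enumerate starts 0).foldl
    (fun acc p =>
      let enum := p.1
      let r := aInner (PySem.List.pyGetD starts enum []) (PySem.List.pyGetD ends enum [])
                 (PySem.List.pyGetD exon_number enum [])
      (acc.1 ++ [r.1], acc.2 ++ [r.2]))
    ([], [])

-- ===== PORT B =====
-- inner 'while j < n and exons[j] > exons[j-1]: j += 1'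
def bExt (xs : List Int) (j : Nat) : Nat :=
  if h : j < xs.length ∧
      PySem.List.pyGetD xs (j : Int) 0 > PySem.List.pyGetD xs (((j - 1 : Nat) : Int)) 0 then
    bExt xs (j + 1)
  else j
termination_by xs.length - j
decreasing_by exact Nat.sub_succ_lt_self xs.length j h.1

theorem bExt_ge (xs : List Int) (j : Nat) : j ≤ bExt xs j := by
  rw [bExt]
  split
  · exact Nat.le_trans (Nat.le_succ j) (bExt_ge xs (j + 1))
  · exact Nat.le_refl j
termination_by xs.length - j
decreasing_by exact Nat.sub_succ_lt_self xs.length j (by rename_i hc; exact hc.1)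

-- outer 'while i < n' loop for one gene: emit one run, jump to its end
def bOuter (S E xs : List Int) (i : Nat) : List (List Int) × List (List Int) :=
  if h : i < xs.length then
    let j := bExt xs (i + 1)
    let segS := (List.range' i (j - i)).map (fun (k : Nat) => PySem.List.pyGetD S ((k : Nat) : Int) 0)
    let segE := (List.range' i (j - i)).map (fun (k : Nat) => PySem.List.pyGetD E ((k : Nat) : Int) 0)
    let rest := bOuter S E xs j
    (segS :: rest.1, segE :: rest.2)
  else ([], [])
termination_by xs.length - i
decreasing_by
  exact Nat.sub_lt_sub_left h (Nat.lt_of_lt_of_le (Nat.lt_succ_self i) (bExt_ge xs (i + 1)))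

def create_gene_sublist_alt (starts : List (List Int)) (ends : List (List Int)) (exon_number : List (List Int)) : List (List (List Int)) × List (List (List Int)) :=
  (PySem.List.pyRange 0 starts.length 1).foldl
    (fun acc g =>
      let r := bOuter (PySem.List.pyGetD starts g []) (PySem.List.pyGetD ends g [])
                 (PySem.List.pyGetD exon_number g []) 0
      (acc.1 ++ [r.1], acc.2 ++ [r.2]))
    ([], [])

-- ===== PRECONDITION & SPEC =====
-- Pre_ excludes exactly the inputs on which Python A raises IndexError: a gene index with no
-- exon list, or an exon list longer than that gene's start/end coordinate lists.
def Pre_create_gene_sublist (starts : List (List Int)) (ends : List (List Int)) (exon_number : List (List Int)) : Prop :=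
  ∀ g ∈ List.range starts.length,
    g < exon_number.length ∧
    (exon_number.getD g [] ≠ [] →
      (exon_number.getD g []).length ≤ (starts.getD g []).length ∧
      g < ends.length ∧
      (exon_number.getD g []).length ≤ (ends.getD g []).length)
instance (starts : List (List Int)) (ends : List (List Int)) (exon_number : List (List Int)) : Decidable (Pre_create_gene_sublist starts ends exon_number) := by unfold Pre_create_gene_sublist; infer_instance

def pvWitness_create_gene_sublist : List (List Int) × List (List Int) × List (List Int) :=
  ([[10, 20, 30]], [[15, 25, 35]], [[1, 2, 1]])

def Spec_create_gene_sublist (starts : List (List Int)) (ends : List (List Int)) (exon_number : List (List Int)) (out : List (List (List Int)) × List (List (List Int))) : Prop := out = create_gene_sublist_alt starts ends exon_number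
instance (starts : List (List Int)) (ends : List (List Int)) (exon_number : List (List Int)) (out : List (List (List Int)) × List (List (List Int))) : Decidable (Spec_create_gene_sublist starts ends exon_number out) := by unfold Spec_create_gene_sublist; infer_instance

-- ===== CLAIM (what is proved, stated in full; the proofs are below) =====
def Claim_equal_create_gene_sublist : Prop := ∀ (starts : List (List Int)) (ends : List (List Int)) (exon_number : List (List Int)), Dom_create_gene_sublist starts ends exon_number → Pre_create_gene_sublist starts ends exon_number → Spec_create_gene_sublist starts ends exon_number (create_gene_sublist starts ends exon_number)

-- ===== LEMMAS AND PROOFS =====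

-- the groups A's loop will still emit, given a nonempty current run (rs, re) and last_ex = last
def pvCont (S E : List Int) (rs re : List Int) (last : Int) :
    List (Int × Int) → List (List Int) × List (List Int)
  | [] => ([rs], [re])
  | (k, ex) :: t =>
    if ex > last then
      pvCont S E (rs ++ [PySem.List.pyGetD S k 0]) (re ++ [PySem.List.pyGetD E k 0]) ex t
    else
      let r := pvCont S E [PySem.List.pyGetD S k 0] [PySem.List.pyGetD E k 0] ex t
      (rs :: r.1, re :: r.2)

theorem foldA (S E : List Int) (l : List (Int × Int)) :
    ∀ (fs fe : List (List Int)) (rs re : List Int) (last : Int), rs ≠ [] → re ≠ [] →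
    aFinish (l.foldl (aStep S E) (fs, fe, rs, re, last)) =
      (fs ++ (pvCont S E rs re last l).1, fe ++ (pvCont S E rs re last l).2) := by
  induction l with
  | nil =>
    intro fs fe rs re last hrs hre
    simp [aFinish, pvCont, hrs]
  | cons p t ih =>
    intro fs fe rs re last hrs hre
    obtain ⟨k, ex⟩ := p
    by_cases hx : ex > last
    · simp only [List.foldl_cons, aStep, hx, if_pos]
      rw [ih fs fe (rs ++ [PySem.List.pyGetD S k 0]) (re ++ [PySem.List.pyGetD E k 0]) ex
        (by simp) (by simp)]
      simp [pvCont, hx]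
    · simp only [List.foldl_cons, aStep, hx, if_neg, if_pos, hrs, hre, ne_eq,
        not_false_iff]
      rw [ih (fs ++ [rs]) (fe ++ [re]) [PySem.List.pyGetD S k 0] [PySem.List.pyGetD E k 0] ex
        (by simp) (by simp)]
      simp [pvCont, hx]

def pvSeg (S : List Int) (a len : Nat) : List Int :=
  (List.range' a len).map (fun (k : Nat) => PySem.List.pyGetD S ((k : Nat) : Int) 0)

theorem pvSeg_snoc (S : List Int) (a m : Nat) :
    pvSeg S a (m + 1) = pvSeg S a m ++ [PySem.List.pyGetD S ((a + m : Nat) : Int) 0] := by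
  simp only [pvSeg, List.range'_concat, one_mul, List.map_append, List.map_cons, List.map_nil]

theorem key (S E xs : List Int) :
    ∀ (fuel i a : Nat), xs.length - i ≤ fuel → a ≤ i → i < xs.length →
    pvCont S E (pvSeg S a (i + 1 - a)) (pvSeg E a (i + 1 - a)) (xs.getD i 0)
        (PySem.List.enumerate (xs.drop (i + 1)) ((i : Int) + 1)) =
      (pvSeg S a (bExt xs (i + 1) - a) :: (bOuter S E xs (bExt xs (i + 1))).1,
       pvSeg E a (bExt xs (i + 1) - a) :: (bOuter S E xs (bExt xs (i + 1))).2) := by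
  intro fuel
  induction fuel with
  | zero => intro i a h1 _ h3; omega
  | succ fuel ih =>
    intro i a h1 ha hi
    have hg : ∀ (k : Nat) (hk : k < xs.length), PySem.List.pyGetD xs ((k : Nat) : Int) 0 = xs[k]'hk := by
      intro k hk
      rw [PySem.List.pyGetD_natCast]
      exact List.getD_eq_getElem xs 0 hk
    have hlast : xs.getD i 0 = xs[i] := List.getD_eq_getElem xs 0 hi
    by_cases hlt : i + 1 < xs.length
    · rw [List.drop_eq_getElem_cons hlt, PySem.List.enumerate_cons]
      have hbext : bExt xs (i + 1) =
          if xs[i + 1] > xs[i] then bExt xs (i + 1 + 1) else i + 1 := by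
        rw [bExt]
        have hsub : (i + 1 - 1 : Nat) = i := by omega
        rw [hsub]
        split <;> rename_i hcond
        · rw [if_pos]
          have hc := hcond.2
          rwa [hg (i + 1) hlt, hg i hi] at hc
        · rw [if_neg]
          intro hgt
          exact hcond ⟨hlt, by rwa [hg (i + 1) hlt, hg i hi]⟩
      have hcast1 : ((i : Int) + 1) = ((i + 1 : Nat) : Int) := by push_cast; ring
      by_cases hx : xs[i + 1] > xs[i]
      · -- the strictly increasing run continues at i+1
        rw [pvCont, hlast, if_pos hx]
        have hsnoc : ∀ T : List Int,
            pvSeg T a (i + 1 - a) ++ [PySem.List.pyGetD T ((i : Int) + 1) 0] =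
            pvSeg T a (i + 1 + 1 - a) := by
          intro T
          have h2 : (i + 1 + 1 - a : Nat) = (i + 1 - a) + 1 := by omega
          have h4 : (a + (i + 1 - a) : Nat) = i + 1 := by omega
          have h3 : ((i : Int) + 1) = ((a + (i + 1 - a) : Nat) : Int) := by rw [h4]; push_cast; ring
          rw [h2, pvSeg_snoc, h3]
        rw [hsnoc S, hsnoc E]
        have := ih (i + 1) a (by omega) (by omega) hlt
        rw [show ((i + 1 : Nat) : Int) = (i : Int) + 1 from by push_cast; ring] at this
        rw [show xs.getD (i + 1) 0 = xs[i + 1] from List.getD_eq_getElem xs 0 hlt] at this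
        rw [this, hbext, if_pos hx]
      · -- break: the run ends at i, a new one starts at i+1
        rw [pvCont, hlast, if_neg hx]
        have hsingle : ∀ T : List Int,
            [PySem.List.pyGetD T ((i : Int) + 1) 0] = pvSeg T (i + 1) (i + 1 + 1 - (i + 1)) := by
          intro T
          rw [show (i + 1 + 1 - (i + 1) : Nat) = 1 from by omega, pvSeg, List.range'_one,
            List.map_cons, List.map_nil, hcast1]
        have hih := ih (i + 1) (i + 1) (by omega) (le_refl _) hlt
        rw [show ((i + 1 : Nat) : Int) = (i : Int) + 1 from by push_cast; ring] at hih
        rw [show xs.getD (i + 1) 0 = xs[i + 1] from List.getD_eq_getElem xs 0 hlt] at hih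
        rw [hsingle S, hsingle E]
        rw [hih]
        rw [hbext, if_neg hx]
        have hb : bOuter S E xs (i + 1) =
            (pvSeg S (i + 1) (bExt xs (i + 1 + 1) - (i + 1)) :: (bOuter S E xs (bExt xs (i + 1 + 1))).1,
             pvSeg E (i + 1) (bExt xs (i + 1 + 1) - (i + 1)) :: (bOuter S E xs (bExt xs (i + 1 + 1))).2) := by
          rw [bOuter, dif_pos hlt]
          rfl
        rw [hb]
    · -- i is the last index of the gene
      rw [List.drop_eq_nil_of_le (by omega), PySem.List.enumerate_nil, pvCont]
      have hb1 : bExt xs (i + 1) = i + 1 := by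
        rw [bExt, dif_neg]
        intro hcond
        omega
      have hb2 : bOuter S E xs (i + 1) = ([], []) := by
        rw [bOuter, dif_neg (by omega)]
      rw [hb1, hb2]

theorem inner_eq (S E xs : List Int) : aInner S E xs = bOuter S E xs 0 := by
  cases xs with
  | nil =>
    rw [bOuter, dif_neg (by simp)]
    simp [aInner, PySem.List.enumerate_nil, aFinish]
  | cons x rest =>
    have hfirst : aStep S E ([], [], [], [], (1 : Int)) (0, x) =
        ([], [], [PySem.List.pyGetD S 0 0], [PySem.List.pyGetD E 0 0], x) := by
      simp [aStep]
    have h0 : (0 : Nat) < (x :: rest).length := by simp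
    have hkey := key S E (x :: rest) (x :: rest).length 0 0 (by omega) (le_refl 0) h0
    have hseg1 : ∀ T : List Int, pvSeg T 0 (0 + 1 - 0) = [PySem.List.pyGetD T 0 0] := by
      intro T
      rw [pvSeg, show (0 + 1 - 0 : Nat) = 1 from rfl, List.range'_one, List.map_cons, List.map_nil,
        show ((0 : Nat) : Int) = (0 : Int) from rfl]
    have hdrop : (x :: rest).drop 1 = rest := rfl
    have hget0 : (x :: rest).getD 0 0 = x := rfl
    rw [hseg1 S, hseg1 E, hdrop, hget0] at hkey
    rw [aInner, PySem.List.enumerate_cons, List.foldl_cons, hfirst,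
        foldA S E _ [] [] _ _ x (by simp) (by simp)]
    norm_num at hkey ⊢
    rw [hkey]
    conv_rhs => rw [bOuter, dif_pos h0]
    simp [pvSeg]

theorem fold_shape {α : Type} (f h : α → List (List Int)) (l : List α) :
    ∀ (as bs : List (List (List Int))),
    l.foldl (fun acc p => (acc.1 ++ [f p], acc.2 ++ [h p])) (as, bs) =
      (as ++ l.map f, bs ++ l.map h) := by
  induction l with
  | nil => intro as bs; simp
  | cons p t ih => intro as bs; simp [ih]

-- ===== VERDICT (by name: the statement is the Claim_ definition above) =====
theorem create_gene_sublist_spec : Claim_equal_create_gene_sublist := by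
  unfold Claim_equal_create_gene_sublist
  intro starts ends exon_number _ _
  unfold Spec_create_gene_sublist
  unfold create_gene_sublist create_gene_sublist_alt
  rw [fold_shape, fold_shape]
  rw [PySem.List.enumerate_eq_map_pyRange starts ([] : List Int)]
  simp only [List.map_map, List.nil_append, Prod.mk.injEq, PySem.List.len]
  constructor <;>
  · apply List.map_congr_left
    intro j hj
    simp [Function.comp, inner_eq]
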